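-- pv_equiv track=rewrite | github.com/alpaylan/GithubCommitsScraper | GithubCommitsScraper.py | count_file_pairs_commited_together
-- ===== SOURCE A (Python) =====
-- def count_file_pairs_commited_together(commits):
--     file_pairs = {}
--     for commit in commits:
--         for file in commit['files']:
--             for file2 in commit['files']:
--                 if file['filename'] != file2['filename']:
--                     f1, f2 = sorted([file['filename'], file2['filename']])
--                     file_pair = (f1, f2)
--                     if file_pair in file_pairs:
--                         file_pairs[file_pair] += 1
--                     else:
--                         file_pairs[file_pair] = 1
--     return file_pairs
-- ===== SOURCE B (Python) =====
-- def count_file_pairs_commited_together(commits):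
--     file_pairs = {}
--     for commit in commits:
--         counts = {}
--         for file in commit['files']:
--             name = file['filename']
--             counts[name] = counts.get(name, 0) + 1
--         names = list(counts)
--         while names:
--             a = names.pop(0)
--             for b in names:
--                 key = (a, b) if a < b else (b, a)
--                 file_pairs[key] = file_pairs.get(key, 0) + 2 * counts[a] * counts[b]
--     return file_pairs
-- ===== Notes on version B (the rewrite author's own statement) =====
-- stated objective: alternative
-- what changed: Per commit B builds a filename->count table and then walks unordered pairs of distinct filename keys once, adding 2*count[a]*count[b], instead of A's nested scan over every ordered pair of file entries.
import Mathlib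
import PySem

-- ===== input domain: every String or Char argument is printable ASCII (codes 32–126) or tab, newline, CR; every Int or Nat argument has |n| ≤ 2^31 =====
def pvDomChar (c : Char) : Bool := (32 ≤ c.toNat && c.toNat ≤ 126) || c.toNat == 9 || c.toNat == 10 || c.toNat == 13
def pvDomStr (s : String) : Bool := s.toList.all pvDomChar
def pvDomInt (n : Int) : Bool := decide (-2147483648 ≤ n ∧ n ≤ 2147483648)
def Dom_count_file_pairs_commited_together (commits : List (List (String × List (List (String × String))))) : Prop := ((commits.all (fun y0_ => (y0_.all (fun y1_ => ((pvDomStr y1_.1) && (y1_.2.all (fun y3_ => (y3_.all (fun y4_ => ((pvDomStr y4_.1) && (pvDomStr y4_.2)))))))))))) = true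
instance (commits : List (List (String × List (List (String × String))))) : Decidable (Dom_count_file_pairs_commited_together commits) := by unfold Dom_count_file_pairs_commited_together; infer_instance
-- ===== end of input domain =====

-- B replaces A's nested scan over ordered pairs of file entries by a per-commit filename
-- counter followed by one walk over unordered pairs of distinct filename keys (alternative
-- decomposition, same result including dict insertion order).

-- ===== PORT A =====
-- commit['files'] : dict lookup (first match); the KeyError case is excluded by Pre_, the
-- .getD default is never reached on admitted inputs
def pvGetFiles (commit : List (String × List (List (String × String)))) : List (List (String × String)) :=
  (List.lookup "files" commit).getD []
-- file['filename']; KeyError excluded by Pre_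
def pvFilename (file : List (String × String)) : String :=
  (List.lookup "filename" file).getD ""
-- f1, f2 = sorted([x, y]); a sorted 2-list always has 2 elements, the catch-all is unreachable
def pvSortedPair (x y : String) : String × String :=
  match PySem.List.sorted [x, y] (fun s => s) false with
  | [a, b] => (a, b)
  | _ => ("", "")

def count_file_pairs_commited_together (commits : List (List (String × List (List (String × String))))) : List (String × String × Int) :=
  (commits.foldl (fun fp commit =>
      (pvGetFiles commit).foldl (fun fp file =>
        (pvGetFiles commit).foldl (fun fp file2 =>
          if pvFilename file ≠ pvFilename file2 then
            let p := pvSortedPair (pvFilename file) (pvFilename file2)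
            if fp.contains p then fp.insert p (fp.getD p 0 + 1) else fp.insert p 1
          else fp) fp) fp)
    PySem.Dict.empty).items.map (fun e => (e.1.1, e.1.2, e.2))

-- ===== PORT B =====
-- (B reads commit['files'] / file['filename'] with the same lookup helpers as port A)
-- key = (a, b) if a < b else (b, a)
def pvbKey (a b : String) : String × String := if a < b then (a, b) else (b, a)
-- while names: a = names.pop(0); for b in names: …
def pvbAddPairs (fp : PySem.Dict (String × String) Int) (counts : PySem.Dict String Int) :
    List String → PySem.Dict (String × String) Int
  | [] => fp
  | a :: names =>
    pvbAddPairs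
      (names.foldl (fun fp b =>
        let key := pvbKey a b
        fp.insert key (fp.getD key 0 + 2 * counts.getD a 0 * counts.getD b 0)) fp)
      counts names

def count_file_pairs_commited_together_alt (commits : List (List (String × List (List (String × String))))) : List (String × String × Int) :=
  (commits.foldl (fun fp commit =>
      let counts := (pvGetFiles commit).foldl
        (fun c file => c.insert (pvFilename file) (c.getD (pvFilename file) 0 + 1)) PySem.Dict.empty
      pvbAddPairs fp counts counts.keys)
    PySem.Dict.empty).items.map (fun e => (e.1.1, e.1.2, e.2))

-- ===== PRECONDITION & SPEC =====
-- A raises KeyError when a commit lacks the key "files" or a file dict lacks "filename";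
-- Pre_ excludes exactly those inputs (B raises there too).
def Pre_count_file_pairs_commited_together (commits : List (List (String × List (List (String × String))))) : Prop :=
  (commits.all (fun commit =>
    match List.lookup "files" commit with
    | some files => files.all (fun file => (List.lookup "filename" file).isSome)
    | none => false)) = true
instance (commits : List (List (String × List (List (String × String))))) : Decidable (Pre_count_file_pairs_commited_together commits) := by
  unfold Pre_count_file_pairs_commited_together; infer_instance
def pvWitness_count_file_pairs_commited_together : (List (List (String × List (List (String × String))))) :=
  [[("files", [[("filename", "a")], [("filename", "b")]])]]

def Spec_count_file_pairs_commited_together (commits : List (List (String × List (List (String × String))))) (out : List (String × String × Int)) : Prop := out = count_file_pairs_commited_together_alt commits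
instance (commits : List (List (String × List (List (String × String))))) (out : List (String × String × Int)) : Decidable (Spec_count_file_pairs_commited_together commits out) := by unfold Spec_count_file_pairs_commited_together; infer_instance

-- ===== CLAIM (what is proved, stated in full; the proofs are below) =====
def Claim_equal_count_file_pairs_commited_together : Prop := ∀ (commits : List (List (String × List (List (String × String))))), Dom_count_file_pairs_commited_together commits → Pre_count_file_pairs_commited_together commits → Spec_count_file_pairs_commited_together commits (count_file_pairs_commited_together commits)

-- ===== LEMMAS AND PROOFS =====

-- `+= w` on a dict entry (0 when absent)
def pvInc (d : PySem.Dict (String × String) Int) (k : String × String) (w : Int) : PySem.Dict (String × String) Int :=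
  d.insert k (d.getD k 0 + w)

-- total weight an event list adds at key k
def pvW (evs : List ((String × String) × Int)) (k : String × String) : Int :=
  ((evs.filter (fun e => e.1 = k)).map (·.2)).sum

-- key sequence A's nested scan touches, in order
def pvKA (fs : List String) : List (String × String) :=
  fs.flatMap (fun a => (fs.filter (fun b => a ≠ b)).map (fun b => pvbKey a b))

-- key sequence of B's walk over pairs of distinct keys
def pvKB : List String → List (String × String)
  | [] => []
  | a :: r => r.map (fun b => pvbKey a b) ++ pvKB r

-- B's walk as an event list
def pvEvB (c : String → Int) : List String → List ((String × String) × Int)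
  | [] => []
  | a :: r => r.map (fun b => (pvbKey a b, 2 * c a * c b)) ++ pvEvB c r

lemma pvW_cons (e : (String × String) × Int) (rest : List ((String × String) × Int)) (k : String × String) :
    pvW (e :: rest) k = (if e.1 = k then e.2 else 0) + pvW rest k := by
  simp only [pvW, List.filter_cons]
  by_cases h : e.1 = k <;> simp [h]

lemma pvW_append (u v : List ((String × String) × Int)) (k : String × String) :
    pvW (u ++ v) k = pvW u k + pvW v k := by
  simp [pvW, List.filter_append]

-- the master characterisation of a += fold over any event list
lemma pvFoldInc_items (evs : List ((String × String) × Int)) (d : PySem.Dict (String × String) Int)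
    (hd : d.keys.Nodup) :
    (evs.foldl (fun d e => pvInc d e.1 e.2) d).items =
      d.items.map (fun kv => (kv.1, kv.2 + pvW evs kv.1)) ++
      ((PySem.Set.ofList (evs.map (·.1))).filter (fun k => !(d.contains k))).map (fun k => (k, pvW evs k)) := by
  induction evs generalizing d with
  | nil =>
    simp [pvW, PySem.Set.ofList]
  | cons e rest ih =>
    obtain ⟨k0, w⟩ := e
    simp only [List.foldl_cons]
    rw [show pvInc d k0 w = d.insert k0 (d.getD k0 0 + w) from rfl,
        ih _ (PySem.Dict.nodup_keys_insert _ _ _ hd)]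
    have hval : ∀ k : String × String, k ≠ k0 → pvW ((k0, w) :: rest) k = pvW rest k := by
      intro k hk
      rw [pvW_cons]
      simp [Ne.symm hk]
    by_cases hc : d.contains k0
    · -- existing key: entries updated in place, key list unchanged
      rw [PySem.Dict.items_insert_of_contains _ _ hc]
      have hfil : ∀ k : String × String,
          (!(d.insert k0 (d.getD k0 0 + w)).contains k) = ((!(d.contains k)) && (!(k == k0))) := by
        intro k
        simp [PySem.Dict.contains_insert, Bool.not_or, Bool.and_comm]
      congr 1
      · rw [List.map_map]
        apply List.map_congr_left
        intro kv hkv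
        by_cases hk : kv.1 = k0
        · have hv : d.getD k0 0 = kv.2 := by
            have hmem : (k0, kv.2) ∈ d.items := by rw [← hk]; exact hkv
            exact PySem.Dict.getD_of_mem_items _ hmem hd 0
          simp [Function.comp, hk, hv, pvW_cons, add_assoc]
        · simp [Function.comp, hk, hval kv.1 hk]
      · simp only [hfil]
        rw [List.map_cons, PySem.Set.ofList_cons]
        simp only [PySem.Set.discard, List.filter_cons]
        have hdrop : (!d.contains k0) = false := by simp [hc]
        simp only [hdrop, Bool.false_eq_true, if_false, List.filter_filter]
        apply List.map_congr_left
        intro k hk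
        rcases List.mem_filter.mp hk with ⟨-, h2⟩
        rcases Bool.and_eq_true_iff.mp h2 with ⟨-, h4⟩
        have : k ≠ k0 := by simpa using h4
        rw [hval k this]
    · -- new key: entry appended at the end
      rw [PySem.Dict.items_insert_of_not_contains _ _ (by simpa using hc),
          PySem.Dict.getD_of_not_contains _ _ (by simpa using hc)]
      have hfil : ∀ k : String × String,
          (!(d.insert k0 (0 + w)).contains k) = ((!(d.contains k)) && (!(k == k0))) := by
        intro k
        simp [PySem.Dict.contains_insert, Bool.not_or, Bool.and_comm]
      simp only [hfil, List.map_append, List.map_cons, List.map_nil]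
      rw [PySem.Set.ofList_cons]
      simp only [PySem.Set.discard, List.filter_cons]
      have hkeep : (!d.contains k0) = true := by simpa using hc
      simp only [hkeep, if_true, List.filter_filter]
      have hitems : List.map (fun kv => (kv.1, kv.2 + pvW rest kv.1)) d.items =
          List.map (fun kv => (kv.1, kv.2 + pvW ((k0, w) :: rest) kv.1)) d.items := by
        apply List.map_congr_left
        intro kv hkv
        have hk : kv.1 ≠ k0 := by
          intro h
          apply hc
          rw [PySem.Dict.contains_iff_mem_keys]
          unfold PySem.Dict.keys
          exact h ▸ List.mem_map.mpr ⟨kv, hkv, rfl⟩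
        rw [hval kv.1 hk]
      rw [hitems, List.append_assoc]
      congr 1
      rw [List.singleton_append]
      congr 1
      · simp [pvW_cons]
      · apply List.map_congr_left
        intro k hk
        rcases List.mem_filter.mp hk with ⟨-, h2⟩
        rcases Bool.and_eq_true_iff.mp h2 with ⟨-, h4⟩
        have : k ≠ k0 := by simpa using h4
        rw [hval k this]

lemma pvFoldInc_keys_nodup (evs : List ((String × String) × Int)) (d : PySem.Dict (String × String) Int)
    (hd : d.keys.Nodup) :
    (evs.foldl (fun d e => pvInc d e.1 e.2) d).keys.Nodup := by
  have hkeys : (evs.foldl (fun d e => pvInc d e.1 e.2) d).keys =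
      d.keys ++ (PySem.Set.ofList (evs.map (·.1))).filter (fun k => !(d.contains k)) := by
    unfold PySem.Dict.keys
    rw [pvFoldInc_items evs d hd, List.map_append, List.map_map, List.map_map]
    congr 1
    exact (List.map_congr_left (fun k _ => rfl)).trans (List.map_id _)
  rw [hkeys]
  refine List.Nodup.append hd (List.Nodup.filter _ (PySem.Set.nodup_ofList _)) ?_
  intro x hx hx2
  rcases List.mem_filter.mp hx2 with ⟨-, h2⟩
  rw [Bool.not_eq_eq_eq_not, Bool.not_true] at h2
  exact absurd ((PySem.Dict.contains_iff_mem_keys _ _).mpr hx) (by simp [h2])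

-- sorted([x, y]) destructured = B's conditional swap, for distinct strings
lemma pvSortedPair_eq (a b : String) (h : a ≠ b) : pvSortedPair a b = pvbKey a b := by
  unfold pvSortedPair pvbKey
  rcases lt_or_gt_of_ne h with hlt | hgt
  · rw [PySem.List.sorted_id_eq_of_perm_of_pairwise [a, b] [a, b] (List.Perm.refl _)
      (List.pairwise_cons.mpr ⟨by intro y hy; rw [List.mem_singleton.mp hy]; exact le_of_lt hlt, by simp⟩)]
    rw [if_pos hlt]
  · rw [PySem.List.sorted_id_eq_of_perm_of_pairwise [a, b] [b, a] (List.Perm.swap a b [])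
      (List.pairwise_cons.mpr ⟨by intro y hy; rw [List.mem_singleton.mp hy]; exact le_of_lt hgt, by simp⟩)]
    rw [if_neg (lt_asymm hgt)]

lemma pvbKey_symm (a b : String) : pvbKey a b = pvbKey b a := by
  unfold pvbKey
  rcases lt_trichotomy a b with h | h | h
  · rw [if_pos h, if_neg (lt_asymm h)]
  · subst h; rfl
  · rw [if_neg (lt_asymm h), if_pos h]

lemma pvbKey_inj {a b x y : String} (hab : a ≠ b) (hxy : x ≠ y) :
    pvbKey a b = pvbKey x y ↔ (a = x ∧ b = y) ∨ (a = y ∧ b = x) := by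
  constructor
  · intro h
    unfold pvbKey at h
    split_ifs at h with h1 h2 h2
    · injection h with h3 h4; exact Or.inl ⟨h3, h4⟩
    · injection h with h3 h4; exact Or.inr ⟨h3, h4⟩
    · injection h with h3 h4; exact Or.inr ⟨h4, h3⟩
    · injection h with h3 h4; exact Or.inl ⟨h4, h3⟩
  · rintro (⟨rfl, rfl⟩ | ⟨rfl, rfl⟩)
    · rfl
    · exact pvbKey_symm a b

-- A's inner loop over entry names, as an event fold
lemma pvInnerA (fs : List String) (a : String) (d : PySem.Dict (String × String) Int) :
    fs.foldl (fun fp b => if a ≠ b then pvInc fp (pvSortedPair a b) 1 else fp) d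
    = ((fs.filter (fun b => a ≠ b)).map (fun b => pvbKey a b)).foldl (fun fp k => pvInc fp k 1) d := by
  induction fs generalizing d with
  | nil => rfl
  | cons b t ih =>
    simp only [List.foldl_cons, List.filter_cons]
    by_cases h : a = b
    · rw [if_neg (by simp [h]), if_neg (by simp [h])]
      exact ih d
    · rw [if_pos h, if_pos (by simp [h]), List.map_cons, List.foldl_cons, pvSortedPair_eq a b h]
      exact ih _

-- A's nested loops over entry names = one fold over the key sequence pvKA
lemma pvStepA_events (l fs : List String) (d : PySem.Dict (String × String) Int) :
    l.foldl (fun fp a => fs.foldl (fun fp b => if a ≠ b then pvInc fp (pvSortedPair a b) 1 else fp) fp) d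
    = (l.flatMap (fun a => (fs.filter (fun b => a ≠ b)).map (fun b => pvbKey a b))).foldl (fun fp k => pvInc fp k 1) d := by
  induction l generalizing d with
  | nil => rfl
  | cons a t ih =>
    simp only [List.foldl_cons, List.flatMap_cons, List.foldl_append]
    rw [pvInnerA, ih]

-- B's while/for walk = one fold over its event list
lemma pvStepB_events (counts : PySem.Dict String Int) (ks : List String) (d : PySem.Dict (String × String) Int) :
    pvbAddPairs d counts ks = (pvEvB (fun z => counts.getD z 0) ks).foldl (fun fp e => pvInc fp e.1 e.2) d := by
  induction ks generalizing d with
  | nil => rfl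
  | cons a r ih =>
    simp only [pvbAddPairs, pvEvB, List.foldl_append]
    rw [ih, List.foldl_map]
    rfl

lemma pvW_units (l : List (String × String)) (k : String × String) :
    pvW (l.map (fun k => (k, (1 : Int)))) k = (l.count k : Int) := by
  induction l with
  | nil => rfl
  | cons x t ih =>
    rw [List.map_cons, pvW_cons, ih]
    by_cases h : x = k <;> simp [h, List.count_cons] <;> omega

lemma pvEvB_map_fst (c : String → Int) (ks : List String) :
    (pvEvB c ks).map (·.1) = pvKB ks := by
  induction ks with
  | nil => rfl
  | cons a r ih => simp [pvEvB, pvKB, ih, List.map_map, Function.comp]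

lemma pv_mem_pvKA {fs : List String} {k : String × String} (h : k ∈ pvKA fs) :
    ∃ a b, a ∈ fs ∧ b ∈ fs ∧ a ≠ b ∧ k = pvbKey a b := by
  rcases List.mem_flatMap.mp h with ⟨a, ha, h2⟩
  rcases List.mem_map.mp h2 with ⟨b, hb, rfl⟩
  rcases List.mem_filter.mp hb with ⟨hb1, hb2⟩
  exact ⟨a, b, ha, hb1, by simpa using hb2, rfl⟩

lemma pv_mem_pvKB : ∀ {ks : List String}, ks.Nodup → ∀ {k : String × String}, k ∈ pvKB ks →
    ∃ a b, a ∈ ks ∧ b ∈ ks ∧ a ≠ b ∧ k = pvbKey a b := by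
  intro ks
  induction ks with
  | nil => intro _ k h; simp [pvKB] at h
  | cons a r ih =>
    intro hnd k h
    rcases List.mem_append.mp h with h1 | h1
    · rcases List.mem_map.mp h1 with ⟨b, hb, rfl⟩
      have hab : a ≠ b := fun e => (List.nodup_cons.mp hnd).1 (e ▸ hb)
      exact ⟨a, b, by simp, by simp [hb], hab, rfl⟩
    · rcases ih (List.nodup_cons.mp hnd).2 h1 with ⟨x, y, hx, hy, hxy, rfl⟩
      exact ⟨x, y, by simp [hx], by simp [hy], hxy, rfl⟩

lemma pvKB_nodup : ∀ {ks : List String}, ks.Nodup → (pvKB ks).Nodup := by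
  intro ks
  induction ks with
  | nil => intro _; simp [pvKB]
  | cons a r ih =>
    intro hnd
    rcases List.nodup_cons.mp hnd with ⟨ha, hr⟩
    refine List.Nodup.append ?_ (ih hr) ?_
    · refine List.Nodup.map_on ?_ hr
      intro b hb b' hb' he
      have hab : a ≠ b := fun e => ha (e ▸ hb)
      have hab' : a ≠ b' := fun e => ha (e ▸ hb')
      rcases (pvbKey_inj hab hab').mp he with ⟨-, h2⟩ | ⟨h1, h2⟩
      · exact h2
      · exact absurd h2.symm hab
    · intro p hp hp2
      rcases List.mem_map.mp hp with ⟨b, hb, rfl⟩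
      rcases pv_mem_pvKB hr hp2 with ⟨x, y, hx, hy, hxy, he⟩
      have hab : a ≠ b := fun e => ha (e ▸ hb)
      rcases (pvbKey_inj hab hxy).mp he with ⟨h1, -⟩ | ⟨h1, -⟩
      · exact ha (h1 ▸ hx)
      · exact ha (h1 ▸ hy)

-- per-outer-entry count of a fixed key in A's inner block
lemma pvCount_block (fs : List String) (a x y : String) (hxy : x ≠ y) :
    ((fs.filter (fun b => a ≠ b)).map (fun b => pvbKey a b)).count (pvbKey x y)
    = if a = x then fs.count y else if a = y then fs.count x else 0 := by
  induction fs with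
  | nil => simp
  | cons b t ih =>
    simp only [List.filter_cons, List.count_cons]
    by_cases hab : a = b
    · rw [if_neg (by simp [hab]), ih]
      split_ifs <;> simp_all
    · rw [if_pos (by simp [hab]), List.map_cons, List.count_cons, ih]
      by_cases h1 : pvbKey a b = pvbKey x y
      · rcases (pvbKey_inj hab hxy).mp h1 with ⟨h2, h3⟩ | ⟨h2, h3⟩
        · split_ifs <;> simp_all
        · have hax : ¬ a = x := fun e => hxy (e.symm.trans h2)
          split_ifs <;> simp_all
      · have hsym : pvbKey x y = pvbKey y x := pvbKey_symm x y
        split_ifs <;> simp_all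

lemma pvSum_ite_two (fs : List String) (x y : String) (hxy : x ≠ y) (A B : Nat) :
    (fs.map (fun a => if a = x then A else if a = y then B else 0)).sum
    = fs.count x * A + fs.count y * B := by
  induction fs with
  | nil => simp
  | cons b t ih =>
    simp only [List.map_cons, List.sum_cons, ih, List.count_cons]
    have hyx : ¬ y = x := fun e => hxy e.symm
    by_cases hbx : b = x <;> by_cases hby : b = y
    · exact absurd (hbx.symm.trans hby) hxy
    · simp_all <;> ring
    · simp_all <;> ring
    · simp_all

lemma pvCount_flatMap (l : List String) (f : String → List (String × String)) (K : String × String) :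
    (l.flatMap f).count K = (l.map (fun a => (f a).count K)).sum := by
  induction l with
  | nil => rfl
  | cons a t ih => simp [List.flatMap_cons, List.count_append, ih]

lemma pvCountA (fs : List String) (x y : String) (hxy : x ≠ y) :
    (pvKA fs).count (pvbKey x y) = fs.count x * fs.count y + fs.count y * fs.count x := by
  unfold pvKA
  rw [pvCount_flatMap,
      List.map_congr_left (fun a (_ : a ∈ fs) => pvCount_block fs a x y hxy),
      pvSum_ite_two fs x y hxy]

lemma pvFilter_eq_singleton : ∀ {r : List String}, r.Nodup → ∀ {y : String}, y ∈ r →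
    r.filter (fun b => b == y) = [y] := by
  intro r
  induction r with
  | nil => intro _ y h; simp at h
  | cons a t ih =>
    intro hnd y hy
    rcases List.nodup_cons.mp hnd with ⟨ha, ht⟩
    rw [List.filter_cons]
    by_cases hay : a = y
    · subst hay
      rw [if_pos (by simp)]
      have : t.filter (fun b => b == a) = [] := by
        apply List.filter_eq_nil_iff.mpr
        intro b hb
        simp only [beq_iff_eq]
        intro e
        exact ha (e ▸ hb)
      rw [this]
    · rw [if_neg (by simp [hay])]
      have hyt : y ∈ t := by
        rcases List.mem_cons.mp hy with h | h
        · exact absurd h.symm hay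
        · exact h
      exact ih ht hyt

lemma pvW_block (r : List String) (a : String) (c : String → Int) (K : String × String) :
    pvW (r.map (fun b => (pvbKey a b, 2 * c a * c b))) K
    = ((r.filter (fun b => pvbKey a b = K)).map (fun b => 2 * c a * c b)).sum := by
  induction r with
  | nil => rfl
  | cons b t ih =>
    simp only [List.map_cons, pvW_cons, List.filter_cons]
    by_cases h : pvbKey a b = K
    · simp [h, ih]
    · simp [h, ih]

lemma pvWB_zero (c : String → Int) : ∀ {ks : List String}, ks.Nodup → ∀ {x y : String}, x ≠ y → x ∉ ks →
    pvW (pvEvB c ks) (pvbKey x y) = 0 := by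
  intro ks
  induction ks with
  | nil => intro _ _ _ _ _; rfl
  | cons a r ih =>
    intro hnd x y hxy hx
    rcases List.nodup_cons.mp hnd with ⟨ha, hr⟩
    rw [show pvEvB c (a :: r) = r.map (fun b => (pvbKey a b, 2 * c a * c b)) ++ pvEvB c r from rfl,
        pvW_append, pvW_block]
    have hxa : ¬ x = a := fun e => hx (by simp [e])
    have hxr : x ∉ r := fun e => hx (by simp [e])
    have hfe : r.filter (fun b => pvbKey a b = pvbKey x y) = [] := by
      apply List.filter_eq_nil_iff.mpr
      intro b hb
      simp only [decide_eq_true_eq]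
      intro he
      have hab : a ≠ b := fun e => ha (e ▸ hb)
      rcases (pvbKey_inj hab hxy).mp he with ⟨h1, -⟩ | ⟨-, h2⟩
      · exact hxa h1.symm
      · exact hxr (h2 ▸ hb)
    rw [hfe, ih hr hxy hxr]
    simp

lemma pvWB (c : String → Int) : ∀ {ks : List String}, ks.Nodup → ∀ {x y : String}, x ∈ ks → y ∈ ks → x ≠ y →
    pvW (pvEvB c ks) (pvbKey x y) = c x * c y + c y * c x := by
  intro ks
  induction ks with
  | nil => intro _ x y h; simp at h
  | cons a r ih =>
    intro hnd x y hx hy hxy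
    rcases List.nodup_cons.mp hnd with ⟨ha, hr⟩
    rw [show pvEvB c (a :: r) = r.map (fun b => (pvbKey a b, 2 * c a * c b)) ++ pvEvB c r from rfl,
        pvW_append, pvW_block]
    by_cases hax : a = x
    · subst hax
      have hyr : y ∈ r := by
        rcases List.mem_cons.mp hy with h | h
        · exact absurd h.symm hxy
        · exact h
      have hcong : r.filter (fun b => pvbKey a b = pvbKey a y) = r.filter (fun b => b == y) := by
        apply List.filter_congr
        intro b hb
        have hab : a ≠ b := fun e => ha (e ▸ hb)
        by_cases hby : b = y
        · simp [hby]
        · have hne : ¬ pvbKey a b = pvbKey a y := by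
            intro he
            rcases (pvbKey_inj hab hxy).mp he with ⟨-, h2⟩ | ⟨h1, -⟩
            · exact hby h2
            · exact hxy h1
          simp [hne, hby]
      rw [hcong, pvFilter_eq_singleton hr hyr, pvWB_zero c hr hxy ha]
      simp
      ring
    · by_cases hay : a = y
      · subst hay
        have hxr : x ∈ r := by
          rcases List.mem_cons.mp hx with h | h
          · exact absurd h hxy
          · exact h
        have hcong : r.filter (fun b => pvbKey a b = pvbKey x a) = r.filter (fun b => b == x) := by
          apply List.filter_congr
          intro b hb
          have hab : a ≠ b := fun e => ha (e ▸ hb)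
          by_cases hbx : b = x
          · subst hbx
            simp [pvbKey_symm]
          · have hne : ¬ pvbKey a b = pvbKey x a := by
              intro he
              rcases (pvbKey_inj hab hxy).mp he with ⟨h1, -⟩ | ⟨-, h2⟩
              · exact hax h1
              · exact hbx h2
            simp [hne, hbx]
        rw [hcong, pvFilter_eq_singleton hr hxr]
        have hz : pvW (pvEvB c r) (pvbKey x a) = 0 := by
          rw [pvbKey_symm]
          exact pvWB_zero c hr (Ne.symm hxy) ha
        rw [hz]
        simp
        ring
      · have hxr : x ∈ r := by
          rcases List.mem_cons.mp hx with h | h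
          · exact absurd h.symm hax
          · exact h
        have hyr : y ∈ r := by
          rcases List.mem_cons.mp hy with h | h
          · exact absurd h.symm hay
          · exact h
        have hfe : r.filter (fun b => pvbKey a b = pvbKey x y) = [] := by
          apply List.filter_eq_nil_iff.mpr
          intro b hb
          simp only [decide_eq_true_eq]
          intro he
          have hab : a ≠ b := fun e => ha (e ▸ hb)
          rcases (pvbKey_inj hab hxy).mp he with ⟨h1, -⟩ | ⟨h1, -⟩
          · exact hax h1
          · exact hay h1
        rw [hfe, ih hr hxr hyr hxy]
        simp

-- the two event lists put the same total weight on every key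
lemma pvW_eq (fs : List String) (k : String × String) :
    pvW ((pvKA fs).map (fun k => (k, (1 : Int)))) k
    = pvW (pvEvB (fun z => (fs.count z : Int)) (PySem.Set.ofList fs)) k := by
  rw [pvW_units]
  by_cases hex : ∃ x y, x ∈ fs ∧ y ∈ fs ∧ x ≠ y ∧ k = pvbKey x y
  · rcases hex with ⟨x, y, hx, hy, hxy, rfl⟩
    rw [pvCountA fs x y hxy,
        pvWB _ (PySem.Set.nodup_ofList fs) ((PySem.Set.mem_ofList _ _).mpr hx) ((PySem.Set.mem_ofList _ _).mpr hy) hxy]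
    push_cast
    ring
  · have h1 : (pvKA fs).count k = 0 := by
      rw [List.count_eq_zero]
      intro hk
      rcases pv_mem_pvKA hk with ⟨a, b, ha, hb, hab, he⟩
      exact hex ⟨a, b, ha, hb, hab, he⟩
    have h2 : pvW (pvEvB (fun z => (fs.count z : Int)) (PySem.Set.ofList fs)) k = 0 := by
      unfold pvW
      have hfe : (pvEvB (fun z => (fs.count z : Int)) (PySem.Set.ofList fs)).filter (fun e => e.1 = k) = [] := by
        apply List.filter_eq_nil_iff.mpr
        intro e he
        simp only [decide_eq_true_eq]
        intro hek
        have hmem : e.1 ∈ pvKB (PySem.Set.ofList fs) := by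
          rw [← pvEvB_map_fst (fun z => (fs.count z : Int))]
          exact List.mem_map.mpr ⟨e, he, rfl⟩
        rcases pv_mem_pvKB (PySem.Set.nodup_ofList fs) hmem with ⟨a, b, ha, hb, hab, he2⟩
        exact hex ⟨a, b, (PySem.Set.mem_ofList _ _).mp ha, (PySem.Set.mem_ofList _ _).mp hb, hab, hek ▸ he2⟩
      rw [hfe]
      rfl
    rw [h1, h2]
    simp

lemma pvOfList_filter {α : Type} [BEq α] [LawfulBEq α] (l : List α) (p : α → Bool) :
    PySem.Set.ofList (l.filter p) = (PySem.Set.ofList l).filter p := by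
  induction l with
  | nil => rfl
  | cons x t ih =>
    rw [List.filter_cons, PySem.Set.ofList_cons]
    by_cases h : p x
    · rw [if_pos h, PySem.Set.ofList_cons, ih]
      rw [List.filter_cons, if_pos h]
      congr 1
      simp only [PySem.Set.discard]
      rw [List.filter_filter, List.filter_filter]
      exact List.filter_congr (fun a _ => Bool.and_comm _ _)
    · rw [if_neg h, ih, List.filter_cons, if_neg h]
      simp only [PySem.Set.discard]
      rw [List.filter_filter]
      apply List.filter_congr
      intro a _
      by_cases hax : a = x
      · subst hax
        have hp : p a = false := by
          cases hp : p a
          · rfl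
          · exact absurd hp h
        simp [hp]
      · simp [hax]

lemma pvOfList_map_inj {α β : Type} [BEq α] [LawfulBEq α] [BEq β] [LawfulBEq β]
    (l : List α) (f : α → β) (hinj : ∀ a ∈ l, ∀ b ∈ l, f a = f b → a = b) :
    PySem.Set.ofList (l.map f) = (PySem.Set.ofList l).map f := by
  induction l with
  | nil => rfl
  | cons x t ih =>
    rw [List.map_cons, PySem.Set.ofList_cons, PySem.Set.ofList_cons, List.map_cons]
    congr 1
    rw [ih (fun a ha b hb he => hinj a (by simp [ha]) b (by simp [hb]) he)]
    simp only [PySem.Set.discard]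
    rw [List.filter_map]
    congr 1
    apply List.filter_congr
    intro a ha
    have hat : a ∈ t := (PySem.Set.mem_ofList _ _).mp ha
    by_cases hax : a = x
    · simp [Function.comp, hax]
    · have hfa : ¬ f a = f x := fun he => hax (hinj a (by simp [hat]) x (by simp) he)
      simp [Function.comp, hax, hfa]

lemma pvFlatMap_skip {α β : Type} [DecidableEq α] (t : List α) (x : α) (h : α → List β) :
    t.flatMap (fun a => if a = x then [] else h a) = (t.filter (fun a => ¬ a = x)).flatMap h := by
  induction t with
  | nil => rfl
  | cons a r ih =>
    simp only [List.flatMap_cons, List.filter_cons]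
    by_cases hax : a = x
    · rw [if_pos hax, if_neg (by simp [hax]), ih]
      rfl
    · rw [if_neg hax, if_pos (by simp [hax]), List.flatMap_cons, ih]

-- first occurrences of A's key sequence come in exactly B's order over distinct filenames
lemma pvL (fs : List String) : PySem.Set.ofList (pvKA fs) = pvKB (PySem.Set.ofList fs) := by
  suffices H : ∀ n (fs : List String), fs.length ≤ n →
      PySem.Set.ofList (pvKA fs) = pvKB (PySem.Set.ofList fs) from H fs.length fs le_rfl
  intro n
  induction n with
  | zero =>
    intro fs h
    cases fs with
    | nil => rfl
    | cons a t => simp at h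
  | succ n ihn =>
    intro fs hlen
    cases fs with
    | nil => rfl
    | cons x t =>
      have htn : t.length ≤ n := by simp at hlen; omega
      set g := t.filter (fun b => x ≠ b) with hg
      have hglen : g.length ≤ n := le_trans (List.length_filter_le _ _) htn
      have hmemg : ∀ {a : String}, a ∈ g → x ≠ a := by
        intro a ha
        have := (List.mem_filter.mp (hg ▸ ha)).2
        simpa using this
      have hintog : ∀ {a : String}, a ∈ t → a ≠ x → a ∈ g := by
        intro a ha hax
        rw [hg]
        exact List.mem_filter.mpr ⟨ha, by simpa using fun e : x = a => hax e.symm⟩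
      have hks : PySem.Set.ofList (x :: t) = x :: PySem.Set.ofList g := by
        rw [PySem.Set.ofList_cons]
        congr 1
        simp only [PySem.Set.discard]
        rw [hg, pvOfList_filter]
        apply List.filter_congr
        intro a _
        by_cases hax : a = x
        · simp [hax]
        · have h2 : ¬ x = a := fun e => hax e.symm
          simp [hax, h2]
      have hhead : (x :: t).filter (fun b => x ≠ b) = g := by
        rw [List.filter_cons, if_neg (by simp), hg]
      have hKA : pvKA (x :: t) = (g.map (fun b => pvbKey x b))
          ++ t.flatMap (fun a => ((x :: t).filter (fun b => a ≠ b)).map (fun b => pvbKey a b)) := by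
        unfold pvKA
        rw [List.flatMap_cons, hhead]
      have hinj : ∀ a ∈ g, ∀ b ∈ g, pvbKey x a = pvbKey x b → a = b := by
        intro a ha b hb he
        rcases (pvbKey_inj (hmemg ha) (hmemg hb)).mp he with ⟨-, h2⟩ | ⟨h1, h2⟩
        · exact h2
        · exact absurd h2.symm (hmemg ha)
      rw [hks, hKA, PySem.Set.ofList_append, PySem.Set.update_eq_append_filter,
          pvOfList_map_inj g _ hinj]
      simp only [pvKB]
      congr 1
      rw [← pvOfList_filter]
      have hmem_s : ∀ {e : String × String},
          e ∈ (PySem.Set.ofList g).map (fun b => pvbKey x b) ↔ ∃ c ∈ g, e = pvbKey x c := by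
        intro e
        constructor
        · intro he
          rcases List.mem_map.mp he with ⟨c, hc, rfl⟩
          exact ⟨c, (PySem.Set.mem_ofList _ _).mp hc, rfl⟩
        · rintro ⟨c, hc, rfl⟩
          exact List.mem_map.mpr ⟨c, (PySem.Set.mem_ofList _ _).mpr hc, rfl⟩
      have hblocks : (t.flatMap (fun a => ((x :: t).filter (fun b => a ≠ b)).map (fun b => pvbKey a b))).filter
            (fun y => !(PySem.Set.contains ((PySem.Set.ofList g).map (fun b => pvbKey x b)) y))
          = pvKA g := by
        rw [List.filter_flatMap]
        rw [List.flatMap_congr (g := fun a => if a = x then [] else (g.filter (fun b => a ≠ b)).map (fun b => pvbKey a b)) ?hcong]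
        case hcong =>
          intro a ha
          show _ = if a = x then ([] : List (String × String)) else (g.filter (fun b => a ≠ b)).map (fun b => pvbKey a b)
          by_cases hax : a = x
          · rw [if_pos hax]
            apply List.filter_eq_nil_iff.mpr
            intro e he
            rcases List.mem_map.mp he with ⟨b, hb, rfl⟩
            rcases List.mem_filter.mp hb with ⟨hbmem, hbne⟩
            subst hax
            have hxb : a ≠ b := by simpa using hbne
            have hbt : b ∈ t := by
              rcases List.mem_cons.mp hbmem with h | h
              · exact absurd h.symm hxb
              · exact h
            have hbg : b ∈ g := hintog hbt (fun e => hxb e.symm)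
            simp
            exact ⟨b, hbg, rfl⟩
          · rw [if_neg hax, List.filter_map, List.filter_filter]
            congr 1
            rw [hg, List.filter_filter, List.filter_cons]
            have hdrop : ¬ ((((fun y => !(PySem.Set.contains ((PySem.Set.ofList g).map (fun b => pvbKey x b)) y)) ∘ fun b => pvbKey a b) x && decide (a ≠ x)) = true) := by
              have hag : a ∈ g := hintog ha hax
              simp
              intro h
              exact absurd (pvbKey_symm x a) (h a hag)
            rw [if_neg hdrop]
            apply List.filter_congr
            intro b hb
            by_cases hbx : b = x
            · subst hbx
              have hag : a ∈ g := hintog ha hax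
              simp
              intro h
              exact absurd (pvbKey_symm b a) (h a ha (hmemg hag))
            · by_cases hab : a = b
              · simp [Function.comp_def, hab]
              · have h2 : ¬ x = b := fun e => hbx e.symm
                simp [Function.comp_def, hab, h2]
                intro c hct hxc he
                rcases (pvbKey_inj (show x ≠ c from hxc) hab).mp he with ⟨h1, -⟩ | ⟨h1, -⟩
                · exact hax h1.symm
                · exact hbx h1.symm
        rw [pvFlatMap_skip]
        have hfg : t.filter (fun a => ¬ a = x) = g := by
          rw [hg]
          apply List.filter_congr
          intro a _
          by_cases hax : a = x
          · simp [hax]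
          · have h2 : ¬ x = a := fun e => hax e.symm
            simp [hax, h2]
        rw [hfg]
        rfl
      exact (congrArg PySem.Set.ofList hblocks).trans (ihn g hglen)

lemma pvAstep_inc (fp : PySem.Dict (String × String) Int) (p : String × String) :
    (if fp.contains p then fp.insert p (fp.getD p 0 + 1) else fp.insert p 1) = pvInc fp p 1 := by
  unfold pvInc
  by_cases h : fp.contains p
  · rw [if_pos h]
  · rw [if_neg h, PySem.Dict.getD_of_not_contains _ _ (by simpa using h), zero_add]

-- one commit of A = one commit of B, from any dict with distinct keys
lemma pvStep_commit (fs : List String) (d : PySem.Dict (String × String) Int) (hd : d.keys.Nodup) :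
    (pvKA fs).foldl (fun fp k => pvInc fp k 1) d
    = (pvEvB (fun z => (fs.count z : Int)) (PySem.Set.ofList fs)).foldl (fun fp e => pvInc fp e.1 e.2) d := by
  have hA : (pvKA fs).foldl (fun fp k => pvInc fp k 1) d
      = ((pvKA fs).map (fun k => (k, (1 : Int)))).foldl (fun fp e => pvInc fp e.1 e.2) d := by
    rw [List.foldl_map]
  rw [hA]
  apply PySem.Dict.ext
  rw [pvFoldInc_items _ _ hd, pvFoldInc_items _ _ hd]
  have e1 : ((pvKA fs).map (fun k => (k, (1 : Int)))).map (·.1) = pvKA fs := by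
    rw [List.map_map]
    exact (List.map_congr_left (fun k _ => rfl)).trans (List.map_id _)
  have e2 : (pvEvB (fun z => (fs.count z : Int)) (PySem.Set.ofList fs)).map (·.1)
      = pvKB (PySem.Set.ofList fs) := pvEvB_map_fst _ _
  congr 1
  · apply List.map_congr_left
    intro kv _
    rw [pvW_eq]
  · rw [e1, e2, pvL, PySem.Set.ofList_eq_self_of_nodup _ (pvKB_nodup (PySem.Set.nodup_ofList fs))]
    apply List.map_congr_left
    intro k _
    rw [pvW_eq]

lemma pvInnerA_full (all : List (List (String × String))) (a : String) (d : PySem.Dict (String × String) Int) :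
    all.foldl (fun fp file2 =>
      if a ≠ pvFilename file2 then
        let p := pvSortedPair a (pvFilename file2)
        if fp.contains p then fp.insert p (fp.getD p 0 + 1) else fp.insert p 1
      else fp) d
    = (all.map pvFilename).foldl (fun fp b => if a ≠ b then pvInc fp (pvSortedPair a b) 1 else fp) d := by
  induction all generalizing d with
  | nil => rfl
  | cons f rest ih =>
    simp only [List.foldl_cons, List.map_cons]
    rw [← ih]
    congr 1
    by_cases h : a ≠ pvFilename f
    · rw [if_pos h, if_pos h]
      exact pvAstep_inc d _
    · rw [if_neg h, if_neg h]

lemma pvStepA_full (files all : List (List (String × String))) (d : PySem.Dict (String × String) Int) :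
    files.foldl (fun fp file =>
        all.foldl (fun fp file2 =>
          if pvFilename file ≠ pvFilename file2 then
            let p := pvSortedPair (pvFilename file) (pvFilename file2)
            if fp.contains p then fp.insert p (fp.getD p 0 + 1) else fp.insert p 1
          else fp) fp) d
    = (files.map pvFilename).foldl (fun fp a =>
        (all.map pvFilename).foldl (fun fp b => if a ≠ b then pvInc fp (pvSortedPair a b) 1 else fp) fp) d := by
  induction files generalizing d with
  | nil => rfl
  | cons f rest ih =>
    simp only [List.foldl_cons, List.map_cons]
    rw [pvInnerA_full all (pvFilename f) d, ih]

lemma pvCounts_eq (files : List (List (String × String))) :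
    files.foldl (fun c file => c.insert (pvFilename file) (c.getD (pvFilename file) 0 + 1)) PySem.Dict.empty
    = PySem.Dict.counter (files.map pvFilename) := by
  rw [← PySem.Dict.foldl_insert_getD_add_one_eq_counter, List.foldl_map]

-- the whole fold over commits, with the keys-distinct invariant
lemma pvFold_commits (commits : List (List (String × List (List (String × String))))) :
    ∀ d : PySem.Dict (String × String) Int, d.keys.Nodup →
    commits.foldl (fun fp commit =>
      (pvGetFiles commit).foldl (fun fp file =>
        (pvGetFiles commit).foldl (fun fp file2 =>
          if pvFilename file ≠ pvFilename file2 then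
            let p := pvSortedPair (pvFilename file) (pvFilename file2)
            if fp.contains p then fp.insert p (fp.getD p 0 + 1) else fp.insert p 1
          else fp) fp) fp) d
    = commits.foldl (fun fp commit =>
        let counts := (pvGetFiles commit).foldl
          (fun c file => c.insert (pvFilename file) (c.getD (pvFilename file) 0 + 1)) PySem.Dict.empty
        pvbAddPairs fp counts counts.keys) d := by
  induction commits with
  | nil => intro d _; rfl
  | cons commit rest ih =>
    intro d hd
    simp only [List.foldl_cons]
    have hstepA : (pvGetFiles commit).foldl (fun fp file =>
        (pvGetFiles commit).foldl (fun fp file2 =>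
          if pvFilename file ≠ pvFilename file2 then
            let p := pvSortedPair (pvFilename file) (pvFilename file2)
            if fp.contains p then fp.insert p (fp.getD p 0 + 1) else fp.insert p 1
          else fp) fp) d
        = (pvKA ((pvGetFiles commit).map pvFilename)).foldl (fun fp k => pvInc fp k 1) d := by
      rw [pvStepA_full, pvStepA_events]
      rfl
    have hstepB : (let counts := (pvGetFiles commit).foldl (fun c file => c.insert (pvFilename file) (c.getD (pvFilename file) 0 + 1)) PySem.Dict.empty; pvbAddPairs d counts counts.keys)
        = (pvEvB (fun z => ((((pvGetFiles commit).map pvFilename)).count z : Int))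
            (PySem.Set.ofList ((pvGetFiles commit).map pvFilename))).foldl (fun fp e => pvInc fp e.1 e.2) d := by
      show pvbAddPairs d _ _ = _
      rw [pvCounts_eq, PySem.Dict.keys_counter, pvStepB_events]
      have hfun : (fun z => (PySem.Dict.counter ((pvGetFiles commit).map pvFilename)).getD z 0)
          = (fun z => ((((pvGetFiles commit).map pvFilename)).count z : Int)) := by
        funext z
        exact PySem.Dict.getD_counter _ _
      rw [hfun]
    rw [hstepA, pvStep_commit _ _ hd, hstepB]
    exact ih _ (pvFoldInc_keys_nodup _ _ hd)

-- ===== VERDICT (by name: the statement is the Claim_ definition above) =====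
theorem count_file_pairs_commited_together_spec : Claim_equal_count_file_pairs_commited_together := by
  intro commits _ _
  unfold Spec_count_file_pairs_commited_together
  unfold count_file_pairs_commited_together count_file_pairs_commited_together_alt
  rw [pvFold_commits commits PySem.Dict.empty PySem.Dict.nodup_keys_empty]
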